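-- pv_equiv track=rewrite | github.com/Sh4rkzDev/AlgorithmsTheory | tp1/extras.py | sortByScaloniAsc
-- ===== SOURCE A (Python) =====
-- def sortByScaloniAsc(data):
--     data.sort(key = lambda item: item[0])
--     total, longest, actual = 0, 0, 0
--     for t in data:
--         total += t[0]
--         actual = total + t[1]
--         if actual > longest:
--             longest = actual
--     return longest
-- ===== SOURCE B (Python) =====
-- def sortByScaloniAsc(data):
--     data.sort(key=lambda item: item[0])
--     # Right-to-left reduction: best over a suffix satisfies
--     #   best((a,b)::rest) = a + max(b, best(rest)),
--     # since adding a distributes over max. No running prefix sum is kept.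
--     m = None
--     for a, b in reversed(data):
--         m = a + (b if m is None else max(b, m))
--     return 0 if m is None else max(0, m)
-- ===== Notes on version B (the rewrite author's own statement) =====
-- stated objective: alternative
-- what changed: Replaces the forward prefix-sum scan by a right-to-left reduction using the identity best((a,b)::rest) = a + max(b, best(rest)) (addition distributes over max), so no running total or prefix sums are maintained at all.
import Mathlib
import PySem

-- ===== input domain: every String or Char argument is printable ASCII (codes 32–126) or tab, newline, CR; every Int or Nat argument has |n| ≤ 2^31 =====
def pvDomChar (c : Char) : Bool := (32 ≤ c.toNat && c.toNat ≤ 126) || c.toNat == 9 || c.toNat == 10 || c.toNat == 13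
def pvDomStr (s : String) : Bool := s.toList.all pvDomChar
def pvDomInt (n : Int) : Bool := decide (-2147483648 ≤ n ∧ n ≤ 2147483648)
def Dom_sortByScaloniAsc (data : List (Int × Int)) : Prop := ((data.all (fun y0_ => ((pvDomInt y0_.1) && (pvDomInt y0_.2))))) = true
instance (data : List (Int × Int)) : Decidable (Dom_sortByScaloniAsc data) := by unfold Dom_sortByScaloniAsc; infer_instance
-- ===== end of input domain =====

-- B replaces the forward prefix-sum scan by a right-to-left reduction using
-- best((a,b)::rest) = a + max(b, best(rest)); same in-place sort as A (equivalence is about the return value).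

-- ===== PORT A =====
-- one forward loop carrying (total, longest); actual recomputed per step
def sortByScaloniAsc (data : List (Int × Int)) : Int :=
  let d := PySem.List.sorted data (fun item => item.1)
  let st := d.foldl (fun (st : Int × Int) t =>
      let total := st.1 + t.1
      let actual := total + t.2
      (total, if actual > st.2 then actual else st.2)) (0, 0)
  st.2

-- ===== PORT B =====
-- the reversed loop of Source B: right-to-left fold with Optional accumulator m
def sortByScaloniAsc_alt (data : List (Int × Int)) : Int :=
  let d := PySem.List.sorted data (fun item => item.1)
  let m := d.foldr (fun t (m : Option Int) =>
      some (t.1 + (match m with | none => t.2 | some v => max t.2 v))) none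
  match m with
  | none => 0
  | some v => max 0 v

-- ===== PRECONDITION & SPEC =====
def Spec_sortByScaloniAsc (data : List (Int × Int)) (out : Int) : Prop := out = sortByScaloniAsc_alt data
instance (data : List (Int × Int)) (out : Int) : Decidable (Spec_sortByScaloniAsc data out) := by unfold Spec_sortByScaloniAsc; infer_instance

-- ===== CLAIM (what is proved, stated in full; the proofs are below) =====
def Claim_equal_sortByScaloniAsc : Prop := ∀ (data : List (Int × Int)), Dom_sortByScaloniAsc data → Spec_sortByScaloniAsc data (sortByScaloniAsc data)

-- ===== LEMMAS AND PROOFS =====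

-- the list of running "actual" values starting with running total s
def pvActs (s : Int) : List (Int × Int) → List Int
  | [] => []
  | t :: ts => (s + t.1 + t.2) :: pvActs (s + t.1) ts

-- A's fold is a max-fold over the acts list
theorem pvFoldA (l : List (Int × Int)) (s L : Int) :
    (l.foldl (fun (st : Int × Int) t =>
      let total := st.1 + t.1
      let actual := total + t.2
      (total, if actual > st.2 then actual else st.2)) (s, L)).2
      = (pvActs s l).foldl max L := by
  induction l generalizing s L with
  | nil => simp [pvActs]
  | cons t ts ih =>
      simp only [List.foldl, pvActs, ih]
      congr 1
      rcases lt_or_ge L (s + t.1 + t.2) with h | h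
      · simp [h, max_eq_right (le_of_lt h)]
      · simp [not_lt.mpr h, max_eq_left h]

-- B's backward fold computes the same max-fold, shifted by s
theorem pvFoldB (l : List (Int × Int)) (s L : Int) :
    (pvActs s l).foldl max L
      = (match l.foldr (fun t (m : Option Int) =>
            some (t.1 + (match m with | none => t.2 | some v => max t.2 v))) none with
         | none => L
         | some v => max L (s + v)) := by
  induction l generalizing s L with
  | nil => simp [pvActs]
  | cons t ts ih =>
      simp only [pvActs, List.foldl, List.foldr, ih]
      cases ts.foldr (fun t (m : Option Int) =>
            some (t.1 + (match m with | none => t.2 | some v => max t.2 v))) none with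
      | none => rw [Int.add_assoc]
      | some v =>
          simp only [max_def, ← Int.add_assoc]
          split_ifs <;> omega

-- ===== VERDICT (by name: the statement is the Claim_ definition above) =====
theorem sortByScaloniAsc_spec : Claim_equal_sortByScaloniAsc := by
  intro data _
  unfold Spec_sortByScaloniAsc sortByScaloniAsc sortByScaloniAsc_alt
  simp only [pvFoldA, pvFoldB _ 0 0]
  cases (PySem.List.sorted data (fun item => item.1)).foldr (fun t (m : Option Int) =>
      some (t.1 + (match m with | none => t.2 | some v => max t.2 v))) none with
  | none => rfl
  | some v => simp
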